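-- pv_equiv track=rewrite | github.com/tomhirsh/AoC-2020-Python | days/day7.py | rec
-- ===== SOURCE A (Python) =====
-- def rec(d, cur_bag, bags_in):
--     if not cur_bag in d.keys():
--         return bags_in
--     res = set({})
--     for bag in d[cur_bag]:
--         bags_in.add(bag)
--         res = res.union(rec(d, bag, bags_in))
--     return res
-- ===== SOURCE B (Python) =====
-- def _reach(d, start):
--     """All bags reachable from any bag in `start` (including `start` itself),
--     by iterating the one-step 'contained in' expansion to a fixpoint."""
--     reach = set(start)
--     while True:
--         new = {nxt for bag in reach if bag in d for nxt in d[bag]} - reach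
--         if not new:
--             break
--         reach |= new
--     return reach
--
-- def rec(d, cur_bag, bags_in):
--     if cur_bag not in d:
--         return bags_in
--     bags_in |= _reach(d, d[cur_bag])
--     return bags_in
-- ===== Notes on version B (the rewrite author's own statement) =====
-- stated objective: alternative
-- what changed: A's naive recursion re-explores every subtree once per path and accumulates unions of intermediate snapshots of the mutated set; B computes the set of transitively contained bags once, by iterating the one-step containment expansion to a fixpoint with a visited set, then unions it into bags_in. …
-- outside the precondition, e.g. on rec({'a': ['b'], 'b': []}, 'a', set()): A returns set(), B returns {'b'}; on rec({'a': ['b', 'c'], 'b': []}, 'a', set()): A returns {'b', 'c'}, B returns {'b', 'c'}; on rec({'a': ['a']}, 'a', set()): A raises RecursionError, B returns {'a'}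
import Mathlib
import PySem

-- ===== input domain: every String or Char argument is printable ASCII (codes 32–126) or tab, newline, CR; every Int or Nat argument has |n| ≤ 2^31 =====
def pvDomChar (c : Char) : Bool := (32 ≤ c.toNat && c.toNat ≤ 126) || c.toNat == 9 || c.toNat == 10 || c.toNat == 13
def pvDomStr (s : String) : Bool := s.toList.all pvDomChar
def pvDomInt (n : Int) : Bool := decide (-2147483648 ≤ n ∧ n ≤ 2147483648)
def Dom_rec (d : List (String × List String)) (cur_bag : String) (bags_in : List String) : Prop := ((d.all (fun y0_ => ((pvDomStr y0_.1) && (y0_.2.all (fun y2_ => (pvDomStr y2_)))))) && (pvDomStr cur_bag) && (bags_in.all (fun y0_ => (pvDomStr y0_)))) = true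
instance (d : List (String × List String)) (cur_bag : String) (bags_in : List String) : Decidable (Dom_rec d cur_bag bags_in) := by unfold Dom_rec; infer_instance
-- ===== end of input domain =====

-- B replaces A's path-by-path recursion by a single fixpoint computation of the reachable-bag
-- set; equivalence is about the RETURN value only (both Pythons mutate bags_in identically,
-- adding exactly the reachable bags). Both ports return the set as a sorted list (a Python set
-- has no order; outputs are compared as finite sets).

-- ===== PORT A =====
-- fuel-based transliteration of A's recursion: state is the pair (bags_in, res); the fuel
-- (d.length + 2) exceeds the recursion depth on every input Pre_rec admits (A raises
-- RecursionError on the others).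
def recA (dd : PySem.Dict String (List String)) : Nat → String → PySem.Set String → PySem.Set String × PySem.Set String
  | 0, _, bagsIn => (bagsIn, bagsIn)
  | fuel+1, cur, bagsIn =>
    match dd.get? cur with
    | none => (bagsIn, bagsIn)                     -- if not cur_bag in d.keys(): return bags_in
    | some cs =>
      cs.foldl (fun st bag =>                      -- for bag in d[cur_bag]:
        let b1 := PySem.Set.add st.1 bag           --   bags_in.add(bag)
        let sub := recA dd fuel bag b1             --   rec(d, bag, bags_in)
        (sub.1, PySem.Set.union st.2 sub.2))       --   res = res.union(...)
        (bagsIn, PySem.Set.empty)                  -- res = set({})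

def rec (d : List (String × List String)) (cur_bag : String) (bags_in : List String) : List String :=
  let dd := PySem.Dict.ofList d
  PySem.List.sorted ((recA dd (d.length + 2) cur_bag (PySem.Set.ofList bags_in)).2) (fun x => x) false

-- ===== PORT B =====
-- _reach: iterate the one-step containment expansion to a fixpoint ('while True: ... break').
-- The fuel bounds the number of iterations: each non-final round adds at least one element of
-- flatten(d.values()) to the (duplicate-free) set, so values-length + 1 rounds always suffice.
def reachLoop (dd : PySem.Dict String (List String)) : Nat → PySem.Set String → PySem.Set String
  | 0, reach => reach
  | fuel+1, reach =>
    let new := PySem.Set.diff                      -- new = {nxt for bag in reach if bag in d for nxt in d[bag]} - reach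
      (PySem.Set.ofList (reach.flatMap (fun bag => dd.getD bag []))) reach
    if new = [] then reach                         -- if not new: break
    else reachLoop dd fuel (PySem.Set.union reach new)  -- reach |= new

def reachFrom (dd : PySem.Dict String (List String)) (start : List String) : PySem.Set String :=
  reachLoop dd (dd.values.flatten.length + 1) (PySem.Set.ofList start)

def rec_alt (d : List (String × List String)) (cur_bag : String) (bags_in : List String) : List String :=
  let dd := PySem.Dict.ofList d
  match dd.get? cur_bag with
  | none => PySem.List.sorted (PySem.Set.ofList bags_in) (fun x => x) false
  | some cs => PySem.List.sorted
      (PySem.Set.union (PySem.Set.ofList bags_in) (reachFrom dd cs)) (fun x => x) false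

-- ===== PRECONDITION & SPEC =====
-- Reachability used ONLY to STATE Pre_rec / D_rec / Raises_rec (no port uses it): the bags
-- reachable from `start` are the stable value of the one-step expansion `closeStep`, which is
-- reached after at most values-length + 1 rounds (each earlier round grows the duplicate-free
-- list by at least one element of the finite value universe).
def closeFrom (dd : PySem.Dict String (List String)) (start : List String) : List String :=
  Nat.iterate (fun S => PySem.List.dedup (S ++ S.flatMap (fun k => dd.getD k [])))
    (dd.values.flatten.length + 1) (PySem.List.dedup start)

-- Pre_rec excludes (a) inputs where a cycle is reachable from cur_bag — there A recurses
-- forever and raises RecursionError — and (b) inputs where some bag reachable from cur_bag maps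
-- to an explicitly empty contents list: such a dead-end bag returns set() instead of the
-- accumulated set, so A's value is an arbitrary intermediate snapshot (down to set()) that
-- depends on the dead-end's position in the traversal — a value B's closure semantics cannot
-- reproduce.
def Pre_rec (d : List (String × List String)) (cur_bag : String) (bags_in : List String) : Prop :=
  let dd := PySem.Dict.ofList d
  ∀ v ∈ closeFrom dd [cur_bag], v ∉ closeFrom dd (dd.getD v []) ∧ dd.get? v ≠ some []
instance (d : List (String × List String)) (cur_bag : String) (bags_in : List String) : Decidable (Pre_rec d cur_bag bags_in) := by unfold Pre_rec; infer_instance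

def pvWitness_rec : (List (String × List String)) × String × List String := ([("a", ["b"])], "a", [])

def Spec_rec (d : List (String × List String)) (cur_bag : String) (bags_in : List String) (out : List String) : Prop := out = rec_alt d cur_bag bags_in
instance (d : List (String × List String)) (cur_bag : String) (bags_in : List String) (out : List String) : Decidable (Spec_rec d cur_bag bags_in out) := by unfold Spec_rec; infer_instance


-- ===== CLAIM (what is proved, stated in full; the proofs are below) =====
def Claim_equal_rec : Prop := ∀ (d : List (String × List String)) (cur_bag : String) (bags_in : List String), Dom_rec d cur_bag bags_in → Pre_rec d cur_bag bags_in → Spec_rec d cur_bag bags_in (rec d cur_bag bags_in)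


-- ===== LEMMAS AND PROOFS =====

-- the containment relation of the dict: a bag `a` directly contains `b`
def EdgeD (dd : PySem.Dict String (List String)) (a b : String) : Prop :=
  ∃ cs, dd.get? a = some cs ∧ b ∈ cs

theorem edgeD_of_mem_getD (dd : PySem.Dict String (List String)) (a x : String)
    (h : x ∈ dd.getD a []) : EdgeD dd a x := by
  rw [PySem.Dict.getD_eq_get?_getD] at h
  cases hg : dd.get? a with
  | none => rw [hg] at h; simp at h
  | some cs => rw [hg] at h; exact ⟨cs, hg, h⟩

theorem getD_of_edgeD (dd : PySem.Dict String (List String)) {a x : String}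
    (h : EdgeD dd a x) : x ∈ dd.getD a [] := by
  obtain ⟨cs, hg, hx⟩ := h
  rw [PySem.Dict.getD_eq_get?_getD, hg]; exact hx

theorem reachLoop_subset (dd : PySem.Dict String (List String)) :
    ∀ f (S : PySem.Set String) x, x ∈ S → x ∈ reachLoop dd f S := by
  intro f
  induction f with
  | zero => intro S x hx; simpa [reachLoop] using hx
  | succ f ih =>
    intro S x hx
    simp only [reachLoop]
    split
    · exact hx
    · exact ih _ x ((PySem.Set.mem_union S _ x).mpr (Or.inl hx))

theorem reachLoop_nodup (dd : PySem.Dict String (List String)) :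
    ∀ f (S : PySem.Set String), S.Nodup → (reachLoop dd f S).Nodup := by
  intro f
  induction f with
  | zero => intro S h; simpa [reachLoop] using h
  | succ f ih =>
    intro S h
    simp only [reachLoop]
    split
    · exact h
    · exact ih _ (PySem.Set.nodup_union S _ h)

theorem reachLoop_sound (dd : PySem.Dict String (List String)) (Q : String → Prop)
    (hQ : ∀ a x, Q a → EdgeD dd a x → Q x) :
    ∀ f (S : PySem.Set String), (∀ x ∈ S, Q x) → ∀ x ∈ reachLoop dd f S, Q x := by
  intro f
  induction f with
  | zero => intro S hS x hx; exact hS x (by simpa [reachLoop] using hx)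
  | succ f ih =>
    intro S hS x hx
    simp only [reachLoop] at hx
    split at hx
    · exact hS x hx
    · refine ih _ ?_ x hx
      intro y hy
      rcases (PySem.Set.mem_union S _ y).mp hy with h | h
      · exact hS y h
      · have h1 : y ∈ PySem.Set.ofList (S.flatMap (fun bag => dd.getD bag [])) :=
          ((PySem.Set.mem_diff _ S y).mp h).1
        have h2 := (PySem.Set.mem_ofList _ y).mp h1
        obtain ⟨bag, hbag, hy2⟩ := List.mem_flatMap.mp h2
        exact hQ bag y (hS bag hbag) (edgeD_of_mem_getD dd bag y hy2)

theorem reachLoop_stable (dd : PySem.Dict String (List String)) :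
    ∀ f (S : PySem.Set String), S.Nodup →
      (dd.values.flatten.toFinset \ S.toFinset).card < f →
      ∀ x ∈ (reachLoop dd f S).flatMap (fun bag => dd.getD bag []), x ∈ reachLoop dd f S := by
  intro f
  induction f with
  | zero => intro S _ hc; omega
  | succ f ih =>
    intro S hnd hc x hx
    simp only [reachLoop] at hx ⊢
    by_cases hnew : PySem.Set.diff (PySem.Set.ofList (S.flatMap (fun bag => dd.getD bag []))) S = ([] : List String)
    · rw [if_pos hnew] at hx ⊢
      by_contra hxs
      have hmem : x ∈ PySem.Set.diff (PySem.Set.ofList (S.flatMap (fun bag => dd.getD bag []))) S :=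
        (PySem.Set.mem_diff _ S x).mpr ⟨(PySem.Set.mem_ofList _ x).mpr hx, hxs⟩
      rw [hnew] at hmem
      simp at hmem
    · rw [if_neg hnew] at hx ⊢
      have hndU : (PySem.Set.union S (PySem.Set.diff (PySem.Set.ofList (S.flatMap (fun bag => dd.getD bag []))) S)).Nodup :=
        PySem.Set.nodup_union S _ hnd
      refine ih (PySem.Set.union S (PySem.Set.diff (PySem.Set.ofList (S.flatMap (fun bag => dd.getD bag []))) S)) hndU ?_ x hx
      obtain ⟨n, hn⟩ := List.exists_mem_of_ne_nil _ hnew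
      have hn1 : n ∈ S.flatMap (fun bag => dd.getD bag []) :=
        (PySem.Set.mem_ofList _ n).mp ((PySem.Set.mem_diff _ S n).mp hn).1
      have hnS : n ∉ S := ((PySem.Set.mem_diff _ S n).mp hn).2
      have hnV : n ∈ dd.values.flatten := by
        obtain ⟨bag, _, hy2⟩ := List.mem_flatMap.mp hn1
        rw [PySem.Dict.getD_eq_get?_getD] at hy2
        cases hg : dd.get? bag with
        | none => rw [hg] at hy2; simp at hy2
        | some cs =>
          rw [hg] at hy2
          refine List.mem_flatten.mpr ⟨cs, ?_, hy2⟩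
          have := PySem.Dict.mem_items_of_get?_eq_some dd hg
          exact List.mem_map.mpr ⟨(bag, cs), this, rfl⟩
      have hsub : dd.values.flatten.toFinset \ (PySem.Set.union S (PySem.Set.diff (PySem.Set.ofList (S.flatMap (fun bag => dd.getD bag []))) S)).toFinset ⊆
          dd.values.flatten.toFinset \ S.toFinset := by
        intro y hy
        rw [Finset.mem_sdiff] at hy ⊢
        refine ⟨hy.1, fun hyS => hy.2 ?_⟩
        rw [List.mem_toFinset] at hyS ⊢
        exact (PySem.Set.mem_union S _ y).mpr (Or.inl hyS)
      have hlt : (dd.values.flatten.toFinset \ (PySem.Set.union S (PySem.Set.diff (PySem.Set.ofList (S.flatMap (fun bag => dd.getD bag []))) S)).toFinset).card <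
          (dd.values.flatten.toFinset \ S.toFinset).card := by
        refine Finset.card_lt_card ⟨hsub, fun hss => ?_⟩
        have hnmem : n ∈ dd.values.flatten.toFinset \ S.toFinset := by
          rw [Finset.mem_sdiff, List.mem_toFinset, List.mem_toFinset]
          exact ⟨hnV, hnS⟩
        have := hss hnmem
        rw [Finset.mem_sdiff, List.mem_toFinset, List.mem_toFinset] at this
        exact this.2 ((PySem.Set.mem_union S _ n).mpr (Or.inr hn))
      omega

theorem mem_reachFrom (dd : PySem.Dict String (List String)) (start : List String) (x : String) :
    x ∈ reachFrom dd start ↔ ∃ s ∈ start, Relation.ReflTransGen (EdgeD dd) s x := by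
  constructor
  · intro hx
    refine reachLoop_sound dd (fun y => ∃ s ∈ start, Relation.ReflTransGen (EdgeD dd) s y)
      (fun a y ⟨s, hs, hsa⟩ he => ⟨s, hs, hsa.tail he⟩) _ _ ?_ x hx
    intro y hy
    exact ⟨y, (PySem.Set.mem_ofList start y).mp hy, Relation.ReflTransGen.refl⟩
  · rintro ⟨s, hs, hst⟩
    induction hst with
    | refl =>
      exact reachLoop_subset dd _ _ s ((PySem.Set.mem_ofList start s).mpr hs)
    | tail hab hbc ih =>
      rename_i b c
      refine reachLoop_stable dd _ _ (PySem.Set.nodup_ofList start) ?_ c ?_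
      · have h1 : (dd.values.flatten.toFinset \ (PySem.Set.ofList start).toFinset).card ≤
            dd.values.flatten.toFinset.card := Finset.card_le_card Finset.sdiff_subset
        have h2 : dd.values.flatten.toFinset.card ≤ dd.values.flatten.length :=
          List.toFinset_card_le _
        omega
      · exact List.mem_flatMap.mpr ⟨b, ih, getD_of_edgeD dd hbc⟩

theorem nodup_reachFrom (dd : PySem.Dict String (List String)) (start : List String) :
    (reachFrom dd start).Nodup :=
  reachLoop_nodup dd _ _ (PySem.Set.nodup_ofList start)

-- proof-side name for the step function closeFrom iterates
def closeStep (dd : PySem.Dict String (List String)) (S : List String) : List String :=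
  PySem.List.dedup (S ++ S.flatMap (fun k => dd.getD k []))

theorem closeFrom_eq_iter (dd : PySem.Dict String (List String)) (start : List String) :
    closeFrom dd start =
      Nat.iterate (closeStep dd) (dd.values.flatten.length + 1) (PySem.List.dedup start) := rfl

theorem mem_closeStep (dd : PySem.Dict String (List String)) (S : List String) (x : String) :
    x ∈ closeStep dd S ↔ x ∈ S ∨ ∃ k ∈ S, x ∈ dd.getD k [] := by
  unfold closeStep
  rw [PySem.List.mem_dedup, List.mem_append, List.mem_flatMap]

theorem nodup_closeStep (dd : PySem.Dict String (List String)) (S : List String) :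
    (closeStep dd S).Nodup := PySem.List.nodup_dedup _

theorem subset_closeIter (dd : PySem.Dict String (List String)) :
    ∀ n (S : List String) x, x ∈ S → x ∈ Nat.iterate (closeStep dd) n S := by
  intro n
  induction n with
  | zero => intro S x hx; exact hx
  | succ n ih =>
    intro S x hx
    rw [Function.iterate_succ_apply]
    exact ih _ x ((mem_closeStep dd S x).mpr (Or.inl hx))

theorem closeIter_sound (dd : PySem.Dict String (List String)) (Q : String → Prop)
    (hQ : ∀ a x, Q a → EdgeD dd a x → Q x) :
    ∀ n (S : List String), (∀ x ∈ S, Q x) → ∀ x ∈ Nat.iterate (closeStep dd) n S, Q x := by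
  intro n
  induction n with
  | zero => intro S hS x hx; exact hS x hx
  | succ n ih =>
    intro S hS x hx
    rw [Function.iterate_succ_apply] at hx
    refine ih _ ?_ x hx
    intro y hy
    rcases (mem_closeStep dd S y).mp hy with h | ⟨k, hk, hyk⟩
    · exact hS y h
    · exact hQ k y (hS k hk) (edgeD_of_mem_getD dd k y hyk)

theorem closeIter_stable (dd : PySem.Dict String (List String)) :
    ∀ n (S : List String), S.Nodup →
      (dd.values.flatten.toFinset \ S.toFinset).card < n →
      ∀ x ∈ closeStep dd (Nat.iterate (closeStep dd) n S), x ∈ Nat.iterate (closeStep dd) n S := by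
  intro n
  induction n with
  | zero => intro S _ hc; omega
  | succ n ih =>
    intro S hnd hc
    rw [Function.iterate_succ_apply]
    by_cases hfix : closeStep dd S = S
    · rw [hfix, Function.iterate_fixed hfix]
      intro x hx; rw [hfix] at hx; exact hx
    · refine ih (closeStep dd S) (nodup_closeStep dd S) ?_
      -- the step is Set.update on a duplicate-free list, so it appends the new elements
      have hupd : closeStep dd S =
          PySem.Set.update S (S.flatMap (fun k => dd.getD k [])) := by
        unfold closeStep
        rw [PySem.List.dedup_eq_ofList, PySem.Set.ofList_append,
          PySem.Set.ofList_eq_self_of_nodup S hnd]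
      have happ := PySem.Set.update_eq_append_filter S (S.flatMap (fun k => dd.getD k []))
      have hextra : (PySem.Set.ofList (S.flatMap (fun k => dd.getD k []))).filter
          (fun y => !PySem.Set.contains S y) ≠ [] := by
        intro h0
        exact hfix (by rw [hupd, happ, h0, List.append_nil])
      obtain ⟨m, hm0⟩ := List.exists_mem_of_ne_nil _ hextra
      have hm := List.mem_filter.mp hm0
      have hmS : m ∉ S := by
        intro hmem
        have := hm.2
        rw [Bool.not_eq_eq_eq_not, Bool.not_true, ← Bool.not_eq_true,
          PySem.Set.contains_iff S m] at this
        exact this hmem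
      have hmV : m ∈ dd.values.flatten := by
        have hmt := (PySem.Set.mem_ofList _ m).mp hm.1
        obtain ⟨k, _, hy2⟩ := List.mem_flatMap.mp hmt
        rw [PySem.Dict.getD_eq_get?_getD] at hy2
        cases hg : dd.get? k with
        | none => rw [hg] at hy2; simp at hy2
        | some cs =>
          rw [hg] at hy2
          refine List.mem_flatten.mpr ⟨cs, ?_, hy2⟩
          have := PySem.Dict.mem_items_of_get?_eq_some dd hg
          exact List.mem_map.mpr ⟨(k, cs), this, rfl⟩
      have hmC : m ∈ closeStep dd S := by
        rw [hupd, happ]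
        exact List.mem_append.mpr (Or.inr hm0)
      have hsub : dd.values.flatten.toFinset \ (closeStep dd S).toFinset ⊆
          dd.values.flatten.toFinset \ S.toFinset := by
        intro y hy
        rw [Finset.mem_sdiff] at hy ⊢
        refine ⟨hy.1, fun hyS => hy.2 ?_⟩
        rw [List.mem_toFinset] at hyS ⊢
        exact (mem_closeStep dd S y).mpr (Or.inl hyS)
      have hlt : (dd.values.flatten.toFinset \ (closeStep dd S).toFinset).card <
          (dd.values.flatten.toFinset \ S.toFinset).card := by
        refine Finset.card_lt_card ⟨hsub, fun hss => ?_⟩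
        have hnmem : m ∈ dd.values.flatten.toFinset \ S.toFinset := by
          rw [Finset.mem_sdiff, List.mem_toFinset, List.mem_toFinset]
          exact ⟨hmV, hmS⟩
        have := hss hnmem
        rw [Finset.mem_sdiff, List.mem_toFinset, List.mem_toFinset] at this
        exact this.2 hmC
      omega

theorem mem_closeFrom (dd : PySem.Dict String (List String)) (start : List String) (x : String) :
    x ∈ closeFrom dd start ↔ ∃ s ∈ start, Relation.ReflTransGen (EdgeD dd) s x := by
  rw [closeFrom_eq_iter]
  constructor
  · intro hx
    refine closeIter_sound dd (fun y => ∃ s ∈ start, Relation.ReflTransGen (EdgeD dd) s y)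
      (fun a y ⟨s, hs, hsa⟩ he => ⟨s, hs, hsa.tail he⟩) _ _ ?_ x hx
    intro y hy
    exact ⟨y, (PySem.List.mem_dedup start y).mp hy, Relation.ReflTransGen.refl⟩
  · rintro ⟨s, hs, hst⟩
    induction hst with
    | refl =>
      exact subset_closeIter dd _ _ s ((PySem.List.mem_dedup start s).mpr hs)
    | tail hab hbc ih =>
      rename_i b c
      refine closeIter_stable dd _ _ (PySem.List.nodup_dedup start) ?_ c ?_
      · have h1 : (dd.values.flatten.toFinset \ (PySem.List.dedup start).toFinset).card ≤
            dd.values.flatten.toFinset.card := Finset.card_le_card Finset.sdiff_subset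
        have h2 : dd.values.flatten.toFinset.card ≤ dd.values.flatten.length :=
          List.toFinset_card_le _
        omega
      · exact (mem_closeStep dd _ c).mpr (Or.inr ⟨b, ih, getD_of_edgeD dd hbc⟩)

theorem no_transGen_of_none (dd : PySem.Dict String (List String)) {v x : String}
    (h : dd.get? v = none) : ¬ Relation.TransGen (EdgeD dd) v x := by
  intro htg
  obtain ⟨b, ⟨cs, hg', _⟩, _⟩ := Relation.TransGen.head'_iff.mp htg
  rw [h] at hg'; exact absurd hg' (by simp)

theorem mem_reachFrom_children (dd : PySem.Dict String (List String)) {v : String}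
    {cs : List String} (h : dd.get? v = some cs) (x : String) :
    x ∈ reachFrom dd cs ↔ Relation.TransGen (EdgeD dd) v x := by
  rw [mem_reachFrom, Relation.TransGen.head'_iff]
  constructor
  · rintro ⟨s, hs, hst⟩; exact ⟨s, ⟨cs, h, hs⟩, hst⟩
  · rintro ⟨s, ⟨cs', hg, hs⟩, hst⟩
    rw [h] at hg
    exact ⟨s, (Option.some_inj.mp hg) ▸ hs, hst⟩

theorem mem_reachFrom_getD (dd : PySem.Dict String (List String)) (v x : String) :
    x ∈ reachFrom dd (dd.getD v []) ↔ Relation.TransGen (EdgeD dd) v x := by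
  cases hg : dd.get? v with
  | none =>
    have hD : dd.getD v [] = [] := by rw [PySem.Dict.getD_eq_get?_getD, hg]; rfl
    rw [hD, mem_reachFrom]
    simp [no_transGen_of_none dd hg]
  | some cs =>
    have hD : dd.getD v [] = cs := by rw [PySem.Dict.getD_eq_get?_getD, hg]; rfl
    rw [hD, mem_reachFrom_children dd hg]

theorem mem_closeFrom_eq (dd : PySem.Dict String (List String)) (start : List String) (x : String) :
    x ∈ closeFrom dd start ↔ x ∈ reachFrom dd start := by
  rw [mem_closeFrom, mem_reachFrom]

theorem mem_closeFrom_single (dd : PySem.Dict String (List String)) (cur v : String) :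
    v ∈ closeFrom dd [cur] ↔ Relation.ReflTransGen (EdgeD dd) cur v := by
  rw [mem_closeFrom]
  simp

theorem acyc_of_pre (d : List (String × List String)) (cur : String) (bags : List String)
    (hPre : Pre_rec d cur bags) :
    ∀ v, Relation.ReflTransGen (EdgeD (PySem.Dict.ofList d)) cur v →
      ¬ Relation.TransGen (EdgeD (PySem.Dict.ofList d)) v v := by
  intro v hv htvv
  exact (hPre v ((mem_closeFrom_single (PySem.Dict.ofList d) cur v).mpr hv)).1
    ((mem_closeFrom_eq (PySem.Dict.ofList d) _ v).mpr
      ((mem_reachFrom_getD (PySem.Dict.ofList d) v v).mpr htvv))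

theorem noempty_of_pre (d : List (String × List String)) (cur : String) (bags : List String)
    (hPre : Pre_rec d cur bags) :
    ∀ v, Relation.ReflTransGen (EdgeD (PySem.Dict.ofList d)) cur v →
      (PySem.Dict.ofList d).get? v ≠ some [] := by
  intro v hv
  exact (hPre v ((mem_closeFrom_single (PySem.Dict.ofList d) cur v).mpr hv)).2

-- rank of a node: how many keys it can strictly reach (decreases along edges under acyclicity)
def rankK (dd : PySem.Dict String (List String)) (v : String) : Nat :=
  ((reachFrom dd (dd.getD v [])).filter (fun k => dd.contains k)).length

def rankB (dd : PySem.Dict String (List String)) (v : String) : Nat :=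
  match dd.get? v with
  | some _ => rankK dd v + 1
  | none => 0

theorem rankB_none (dd : PySem.Dict String (List String)) {v : String}
    (h : dd.get? v = none) : rankB dd v = 0 := by
  unfold rankB; rw [h]

theorem rankB_some (dd : PySem.Dict String (List String)) {v : String} {cs : List String}
    (h : dd.get? v = some cs) : rankB dd v = rankK dd v + 1 := by
  unfold rankB; rw [h]

theorem mem_rankFilter (dd : PySem.Dict String (List String)) (v k : String) :
    k ∈ (reachFrom dd (dd.getD v [])).filter (fun k => dd.contains k) ↔
      Relation.TransGen (EdgeD dd) v k ∧ k ∈ dd.keys := by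
  rw [List.mem_filter, mem_reachFrom_getD]
  constructor
  · rintro ⟨h1, h2⟩; exact ⟨h1, (PySem.Dict.contains_iff_mem_keys dd k).mp h2⟩
  · rintro ⟨h1, h2⟩; exact ⟨h1, (PySem.Dict.contains_iff_mem_keys dd k).mpr h2⟩

theorem rankK_lt (dd : PySem.Dict String (List String)) {cur v c : String}
    (hacyc : ∀ w, Relation.ReflTransGen (EdgeD dd) cur w → ¬ Relation.TransGen (EdgeD dd) w w)
    (hv : Relation.ReflTransGen (EdgeD dd) cur v) (he : EdgeD dd v c) (hc : c ∈ dd.keys) :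
    rankK dd c < rankK dd v := by
  unfold rankK
  have hnc : ((reachFrom dd (dd.getD c [])).filter (fun k => dd.contains k)).Nodup :=
    (nodup_reachFrom dd _).filter _
  have hnv : ((reachFrom dd (dd.getD v [])).filter (fun k => dd.contains k)).Nodup :=
    (nodup_reachFrom dd _).filter _
  rw [← List.toFinset_card_of_nodup hnc, ← List.toFinset_card_of_nodup hnv]
  refine Finset.card_lt_card ⟨fun k hk => ?_, fun hss => ?_⟩
  · rw [List.mem_toFinset, mem_rankFilter] at hk ⊢
    exact ⟨Relation.TransGen.head he hk.1, hk.2⟩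
  · have hcv : c ∈ ((reachFrom dd (dd.getD v [])).filter (fun k => dd.contains k)).toFinset := by
      rw [List.mem_toFinset, mem_rankFilter]
      exact ⟨Relation.TransGen.single he, hc⟩
    have := hss hcv
    rw [List.mem_toFinset, mem_rankFilter] at this
    exact hacyc c (hv.tail he) this.1

theorem mem_keys_update_aux :
    ∀ (l : List (String × List String)) (dd0 : PySem.Dict String (List String)) (k : String),
      k ∈ (dd0.update l).keys → k ∈ dd0.keys ∨ k ∈ l.map Prod.fst := by
  intro l
  induction l with
  | nil => intro dd0 k hk; exact Or.inl hk
  | cons p t ih =>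
    intro dd0 k hk
    have heq : (dd0.update (p :: t)) = ((dd0.insert p.1 p.2).update t) := rfl
    rw [heq] at hk
    rcases ih _ k hk with h | h
    · rcases (PySem.Dict.mem_keys_insert dd0 p.1 k p.2).mp h with h' | h'
      · exact Or.inr (by simp [h'])
      · exact Or.inl h'
    · exact Or.inr (by simp only [List.map_cons, List.mem_cons]; exact Or.inr h)

theorem rankK_le (d : List (String × List String)) (v : String) :
    rankK (PySem.Dict.ofList d) v ≤ d.length := by
  unfold rankK
  have hnd : ((reachFrom (PySem.Dict.ofList d) ((PySem.Dict.ofList d).getD v [])).filter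
      (fun k => (PySem.Dict.ofList d).contains k)).Nodup := (nodup_reachFrom _ _).filter _
  rw [← List.toFinset_card_of_nodup hnd]
  calc ((reachFrom (PySem.Dict.ofList d) ((PySem.Dict.ofList d).getD v [])).filter
          (fun k => (PySem.Dict.ofList d).contains k)).toFinset.card
      ≤ (d.map Prod.fst).toFinset.card := by
        refine Finset.card_le_card fun k hk => ?_
        rw [List.mem_toFinset, mem_rankFilter] at hk
        rw [List.mem_toFinset]
        rcases mem_keys_update_aux d PySem.Dict.empty k hk.2 with h | h
        · simp [PySem.Dict.empty, PySem.Dict.keys] at h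
        · exact h
    _ ≤ (d.map Prod.fst).length := List.toFinset_card_le _
    _ = d.length := List.length_map Prod.fst

theorem recA_none (dd : PySem.Dict String (List String)) (f : Nat) (cur : String)
    (b : PySem.Set String) (h : dd.get? cur = none) : recA dd f cur b = (b, b) := by
  cases f with
  | zero => rfl
  | succ f => simp [recA, h]

theorem recA_char (dd : PySem.Dict String (List String)) (cur0 : String)
    (hacyc : ∀ w, Relation.ReflTransGen (EdgeD dd) cur0 w → ¬ Relation.TransGen (EdgeD dd) w w)
    (hne : ∀ w, Relation.ReflTransGen (EdgeD dd) cur0 w → dd.get? w ≠ some []) :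
    ∀ f : Nat,
      (∀ v b, Relation.ReflTransGen (EdgeD dd) cur0 v → rankB dd v ≤ f →
        ∀ x, x ∈ (recA dd f v b).1 ↔ x ∈ b ∨ Relation.TransGen (EdgeD dd) v x) ∧
      (∀ v b, Relation.ReflTransGen (EdgeD dd) cur0 v → rankB dd v ≤ f →
        (dd.get? v).isSome = true →
        ∀ x, x ∈ (recA dd f v b).2 ↔ x ∈ b ∨ Relation.TransGen (EdgeD dd) v x) := by
  intro f
  induction f with
  | zero =>
    constructor
    · intro v b _ hr x
      cases hg : dd.get? v with
      | none =>
        rw [recA_none dd 0 v b hg]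
        simp [no_transGen_of_none dd hg]
      | some cs => unfold rankB at hr; rw [hg] at hr; simp at hr
    · intro v b _ hr hs
      cases hg : dd.get? v with
      | none => rw [hg] at hs; simp at hs
      | some cs => unfold rankB at hr; rw [hg] at hr; simp at hr
  | succ f ih =>
    obtain ⟨IH1, IH2⟩ := ih
    have fold :
        ∀ (csl : List String), (∀ c ∈ csl, Relation.ReflTransGen (EdgeD dd) cur0 c ∧ rankB dd c ≤ f) →
        ∀ (b r : PySem.Set String),
          (∀ x, x ∈ (csl.foldl (fun st bag =>
              let b1 := PySem.Set.add st.1 bag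
              let sub := recA dd f bag b1
              (sub.1, PySem.Set.union st.2 sub.2)) (b, r)).1 ↔
            x ∈ b ∨ ∃ c ∈ csl, x = c ∨ Relation.TransGen (EdgeD dd) c x) ∧
          (∀ x, x ∈ (csl.foldl (fun st bag =>
              let b1 := PySem.Set.add st.1 bag
              let sub := recA dd f bag b1
              (sub.1, PySem.Set.union st.2 sub.2)) (b, r)).2 ↔
            x ∈ r ∨ (csl ≠ [] ∧ (x ∈ b ∨ ∃ c ∈ csl, x = c ∨ Relation.TransGen (EdgeD dd) c x))) := by
      intro csl
      induction csl with
      | nil => intro _ b r; constructor <;> intro x <;> simp [List.foldl]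
      | cons c cst ihl =>
        intro hcs b r
        obtain ⟨hcref, hcrank⟩ := hcs c List.mem_cons_self
        have char1 : ∀ x, x ∈ (recA dd f c (PySem.Set.add b c)).1 ↔
            (x ∈ b ∨ x = c) ∨ Relation.TransGen (EdgeD dd) c x := by
          intro x
          rw [IH1 c (PySem.Set.add b c) hcref hcrank x, PySem.Set.mem_add]
        have char2 : ∀ x, x ∈ (recA dd f c (PySem.Set.add b c)).2 ↔
            (x ∈ b ∨ x = c) ∨ Relation.TransGen (EdgeD dd) c x := by
          intro x
          cases hgc : dd.get? c with
          | none =>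
            rw [recA_none dd f c _ hgc, PySem.Set.mem_add]
            simp [no_transGen_of_none dd hgc]
          | some csc =>
            rw [IH2 c (PySem.Set.add b c) hcref hcrank (by rw [hgc]; rfl) x, PySem.Set.mem_add]
        have hstep : ((c :: cst).foldl (fun st bag =>
              let b1 := PySem.Set.add st.1 bag
              let sub := recA dd f bag b1
              (sub.1, PySem.Set.union st.2 sub.2)) (b, r)) =
            (cst.foldl (fun st bag =>
              let b1 := PySem.Set.add st.1 bag
              let sub := recA dd f bag b1
              (sub.1, PySem.Set.union st.2 sub.2))
              ((recA dd f c (PySem.Set.add b c)).1,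
               PySem.Set.union r (recA dd f c (PySem.Set.add b c)).2)) := rfl
        obtain ⟨ihl1, ihl2⟩ := ihl (fun c' hc' => hcs c' (List.mem_cons_of_mem c hc'))
          ((recA dd f c (PySem.Set.add b c)).1)
          (PySem.Set.union r (recA dd f c (PySem.Set.add b c)).2)
        constructor
        · intro x
          rw [hstep, ihl1 x, char1 x]
          simp only [List.mem_cons]
          constructor
          · rintro (((h | h) | h) | ⟨c', hc', h⟩)
            · exact Or.inl h
            · exact Or.inr ⟨c, Or.inl rfl, Or.inl h⟩
            · exact Or.inr ⟨c, Or.inl rfl, Or.inr h⟩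
            · exact Or.inr ⟨c', Or.inr hc', h⟩
          · rintro (h | ⟨c', (rfl | hc'), h⟩)
            · exact Or.inl (Or.inl (Or.inl h))
            · rcases h with h | h
              · exact Or.inl (Or.inl (Or.inr h))
              · exact Or.inl (Or.inr h)
            · exact Or.inr ⟨c', hc', h⟩
        · intro x
          rw [hstep, ihl2 x, PySem.Set.mem_union, char2 x, char1 x]
          simp only [List.mem_cons, ne_eq, List.cons_ne_nil, not_false_iff, true_and]
          constructor
          · rintro ((h | h) | ⟨_, (h | ⟨c', hc', h⟩)⟩)
            · exact Or.inl h
            · rcases h with (h | h) | h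
              · exact Or.inr (Or.inl h)
              · exact Or.inr (Or.inr ⟨c, Or.inl rfl, Or.inl h⟩)
              · exact Or.inr (Or.inr ⟨c, Or.inl rfl, Or.inr h⟩)
            · rcases h with (h | h) | h
              · exact Or.inr (Or.inl h)
              · exact Or.inr (Or.inr ⟨c, Or.inl rfl, Or.inl h⟩)
              · exact Or.inr (Or.inr ⟨c, Or.inl rfl, Or.inr h⟩)
            · exact Or.inr (Or.inr ⟨c', Or.inr hc', h⟩)
          · rintro (h | (h | ⟨c', (rfl | hc'), h⟩))
            · exact Or.inl (Or.inl h)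
            · exact Or.inl (Or.inr (Or.inl (Or.inl h)))
            · rcases h with h | h
              · exact Or.inl (Or.inr (Or.inl (Or.inr h)))
              · exact Or.inl (Or.inr (Or.inr h))
            · cases cst with
              | nil => simp at hc'
              | cons a t => exact Or.inr ⟨by simp, Or.inr ⟨c', hc', h⟩⟩
    have hchild : ∀ {v cs}, dd.get? v = some cs →
        Relation.ReflTransGen (EdgeD dd) cur0 v → rankB dd v ≤ f + 1 →
        ∀ c ∈ cs, Relation.ReflTransGen (EdgeD dd) cur0 c ∧ rankB dd c ≤ f := by
      intro v cs hg hv hr c hc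
      have he : EdgeD dd v c := ⟨cs, hg, hc⟩
      refine ⟨hv.tail he, ?_⟩
      cases hgc : dd.get? c with
      | none => rw [rankB_none dd hgc]; omega
      | some csc =>
        have hck : c ∈ dd.keys := by
          by_contra hkk
          rw [← PySem.Dict.get?_eq_none_iff_not_mem_keys dd c] at hkk
          rw [hgc] at hkk; exact absurd hkk (by simp)
        have hlt := rankK_lt dd hacyc hv he hck
        rw [rankB_some dd hg] at hr
        rw [rankB_some dd hgc]
        omega
    have hdecomp : ∀ {v cs x}, dd.get? v = some cs →
        (Relation.TransGen (EdgeD dd) v x ↔ ∃ c ∈ cs, x = c ∨ Relation.TransGen (EdgeD dd) c x) := by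
      intro v cs x hg
      rw [Relation.TransGen.head'_iff]
      constructor
      · rintro ⟨c, ⟨cs', hg', hc⟩, hcx⟩
        rw [hg] at hg'
        refine ⟨c, (Option.some_inj.mp hg') ▸ hc, ?_⟩
        exact Relation.reflTransGen_iff_eq_or_transGen.mp hcx
      · rintro ⟨c, hc, h⟩
        exact ⟨c, ⟨cs, hg, hc⟩, Relation.reflTransGen_iff_eq_or_transGen.mpr h⟩
    constructor
    · intro v b hv hr x
      cases hg : dd.get? v with
      | none =>
        rw [recA_none dd (f+1) v b hg]
        simp [no_transGen_of_none dd hg]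
      | some cs =>
        have hunf : recA dd (f+1) v b = cs.foldl (fun st bag =>
            let b1 := PySem.Set.add st.1 bag
            let sub := recA dd f bag b1
            (sub.1, PySem.Set.union st.2 sub.2)) (b, PySem.Set.empty) := by
          simp [recA, hg]
        rw [hunf, (fold cs (hchild hg hv hr) b PySem.Set.empty).1 x, hdecomp hg]
    · intro v b hv hr hs x
      cases hg : dd.get? v with
      | none => rw [hg] at hs; simp at hs
      | some cs =>
        have hcs0 : cs ≠ [] := fun h => hne v hv (h ▸ hg)
        have hunf : recA dd (f+1) v b = cs.foldl (fun st bag =>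
            let b1 := PySem.Set.add st.1 bag
            let sub := recA dd f bag b1
            (sub.1, PySem.Set.union st.2 sub.2)) (b, PySem.Set.empty) := by
          simp [recA, hg]
        rw [hunf, (fold cs (hchild hg hv hr) b PySem.Set.empty).2 x, hdecomp hg]
        simp [PySem.Set.empty, hcs0]

theorem recA_nodup (dd : PySem.Dict String (List String)) :
    ∀ f v (b : PySem.Set String), b.Nodup → (recA dd f v b).1.Nodup ∧ (recA dd f v b).2.Nodup := by
  intro f
  induction f with
  | zero => intro v b hb; exact ⟨hb, hb⟩
  | succ f ih =>
    intro v b hb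
    cases hg : dd.get? v with
    | none => rw [recA_none dd (f+1) v b hg]; exact ⟨hb, hb⟩
    | some cs =>
      have hunf : recA dd (f+1) v b = cs.foldl (fun st bag =>
          let b1 := PySem.Set.add st.1 bag
          let sub := recA dd f bag b1
          (sub.1, PySem.Set.union st.2 sub.2)) (b, PySem.Set.empty) := by
        simp [recA, hg]
      rw [hunf]
      have haux : ∀ (csl : List String) (b r : PySem.Set String), b.Nodup → r.Nodup →
          (csl.foldl (fun st bag =>
            let b1 := PySem.Set.add st.1 bag
            let sub := recA dd f bag b1
            (sub.1, PySem.Set.union st.2 sub.2)) (b, r)).1.Nodup ∧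
          (csl.foldl (fun st bag =>
            let b1 := PySem.Set.add st.1 bag
            let sub := recA dd f bag b1
            (sub.1, PySem.Set.union st.2 sub.2)) (b, r)).2.Nodup := by
        intro csl
        induction csl with
        | nil => intro b r hb hr; exact ⟨hb, hr⟩
        | cons c cst ihl =>
          intro b r hb hr
          have hsub := ih c (PySem.Set.add b c) (PySem.Set.nodup_add b c hb)
          exact ihl _ _ hsub.1 (PySem.Set.nodup_union r _ hr)
      exact haux cs b PySem.Set.empty hb List.nodup_nil

-- ===== VERDICT (by name: the statement is the Claim_ definition above) =====
theorem rec_spec : Claim_equal_rec := by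
  intro d cur bags _ hPre
  unfold Spec_rec
  cases hg : (PySem.Dict.ofList d).get? cur with
  | none =>
    have e1 : rec d cur bags = PySem.List.sorted (PySem.Set.ofList bags) (fun x => x) false := by
      simp only [rec]
      rw [recA_none _ _ _ _ hg]
    have e2 : rec_alt d cur bags = PySem.List.sorted (PySem.Set.ofList bags) (fun x => x) false := by
      simp only [rec_alt]
      rw [hg]
    rw [e1, e2]
  | some cs =>
    have hacyc := acyc_of_pre d cur bags hPre
    have hne := noempty_of_pre d cur bags hPre
    have hchar2 := (recA_char (PySem.Dict.ofList d) cur hacyc hne (d.length + 2)).2 cur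
      (PySem.Set.ofList bags) Relation.ReflTransGen.refl
      (by rw [rankB_some _ hg]; have := rankK_le d cur; omega) (by rw [hg]; rfl)
    have hndA := (recA_nodup (PySem.Dict.ofList d) (d.length + 2) cur (PySem.Set.ofList bags)
      (PySem.Set.nodup_ofList bags)).2
    have hndB : (PySem.Set.union (PySem.Set.ofList bags)
        (reachFrom (PySem.Dict.ofList d) cs)).Nodup :=
      PySem.Set.nodup_union _ _ (PySem.Set.nodup_ofList bags)
    have hperm : ((recA (PySem.Dict.ofList d) (d.length + 2) cur (PySem.Set.ofList bags)).2).Perm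
        (PySem.Set.union (PySem.Set.ofList bags) (reachFrom (PySem.Dict.ofList d) cs)) := by
      rw [List.perm_ext_iff_of_nodup hndA hndB]
      intro x
      rw [hchar2 x, PySem.Set.mem_union, mem_reachFrom_children (PySem.Dict.ofList d) hg x]
    have e2 : rec_alt d cur bags = PySem.List.sorted
        (PySem.Set.union (PySem.Set.ofList bags) (reachFrom (PySem.Dict.ofList d) cs))
        (fun x => x) false := by
      simp only [rec_alt]
      rw [hg]
    simp only [rec]
    rw [e2]
    exact PySem.List.sorted_eq_sorted_of_perm _ _ _ (fun a b h => h) hperm
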